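-- pv_equiv track=rewrite | github.com/DancingOnAir/LeetcodePythonSolution | String/1525_number_of_good_ways_to_split_a_string.py | numSplits1
-- ===== SOURCE A (Python) =====
-- def numSplits1(s: str) -> int:
--     def helper(c):
--         return sum(1 if i > 0 else 0 for i in c)
--
--     c1, c2 = [0] * 26, [0] * 26
--     for c in s:
--         c1[ord(c) - 97] += 1
--
--     res = 0
--     for c in s:
--         idx = ord(c) - 97
--         c1[idx] -= 1
--         c2[idx] += 1
--
--         if helper(c1) == helper(c2):
--             res += 1
--
--     return res
-- ===== SOURCE B (Python) =====
-- def numSplits1(s: str) -> int: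
--     right = [0]
--     seen = [False] * 26
--     cnt = 0
--     for c in reversed(s):
--         idx = ord(c) - 97
--         if not seen[idx]:
--             seen[idx] = True
--             cnt += 1
--         right.append(cnt)
--     right.reverse()
--     res = 0
--     seen = [False] * 26
--     cnt = 0
--     for c, rd in zip(s, right[1:]):
--         idx = ord(c) - 97
--         if not seen[idx]:
--             seen[idx] = True
--             cnt += 1
--         if cnt == rd:
--             res += 1
--     return res
-- ===== Notes on version B (the rewrite author's own statement) =====
-- stated objective: faster
-- what changed: Replaces A's two 26-bucket frequency arrays, fully rescanned by helper() at every split position, with a right-to-left pass that tabulates suffix distinct counts using a boolean seen-array and running counter, followed by one left-to-right comparison pass.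
import Mathlib
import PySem

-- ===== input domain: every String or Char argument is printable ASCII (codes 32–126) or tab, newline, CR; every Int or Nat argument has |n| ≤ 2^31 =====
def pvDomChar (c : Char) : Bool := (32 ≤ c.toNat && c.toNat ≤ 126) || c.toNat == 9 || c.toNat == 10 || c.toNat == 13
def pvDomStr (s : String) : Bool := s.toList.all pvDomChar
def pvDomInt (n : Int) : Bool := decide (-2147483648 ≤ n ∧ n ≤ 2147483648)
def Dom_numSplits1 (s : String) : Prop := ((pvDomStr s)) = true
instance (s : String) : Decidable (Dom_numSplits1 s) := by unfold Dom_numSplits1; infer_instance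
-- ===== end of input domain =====

-- B replaces A's per-split rescans of two 26-bucket frequency arrays by a suffix-distinct
-- table built right-to-left with a seen-array and running counter, then one left-to-right
-- comparison pass (objective: faster by a constant factor; equal return values on Pre_).

-- ===== PORT A =====
def pyHelper (c : List Int) : Int := (c.map (fun i => if i > 0 then (1:Int) else 0)).sum
-- Python's c[idx] += d (negative idx wraps from the end); out-of-range = IndexError, outside Pre_
def pyAddAt (c : List Int) (idx d : Int) : List Int :=
  PySem.List.pySetD c idx (PySem.List.pyGetD c idx 0 + d)

def numSplits1 (s : String) : Int :=
  let c1 := s.toList.foldl (fun c ch => pyAddAt c ((ch.toNat : Int) - 97) 1) (List.replicate 26 0)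
  (s.toList.foldl
     (fun (st : Int × List Int × List Int) ch =>
        let idx : Int := (ch.toNat : Int) - 97
        let c1' := pyAddAt st.2.1 idx (-1)
        let c2' := pyAddAt st.2.2 idx 1
        (if pyHelper c1' = pyHelper c2' then st.1 + 1 else st.1, c1', c2'))
     ((0 : Int), c1, List.replicate 26 0)).1

-- ===== PORT B =====
-- seen[idx] read and write use Python's index semantics (negative idx wraps; IndexError
-- on out-of-range is outside Pre_, where pyGetD's default is never reached)
def numSplits1_alt (s : String) : Int :=
  let cs := s.toList
  let st1 := cs.reverse.foldl
      (fun (p : List Int × List Bool × Int) c =>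
         let idx : Int := (c.toNat : Int) - 97
         let sc : List Bool × Int :=
           if PySem.List.pyGetD p.2.1 idx false then (p.2.1, p.2.2)
           else (PySem.List.pySetD p.2.1 idx true, p.2.2 + 1)
         (p.1 ++ [sc.2], sc.1, sc.2))
      ([(0 : Int)], List.replicate 26 false, (0 : Int))
  let right := st1.1.reverse
  ((cs.zip (PySem.List.slice right (some 1) none)).foldl
      (fun (q : Int × List Bool × Int) cr =>
         let idx : Int := (cr.1.toNat : Int) - 97
         let sc : List Bool × Int :=
           if PySem.List.pyGetD q.2.1 idx false then (q.2.1, q.2.2)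
           else (PySem.List.pySetD q.2.1 idx true, q.2.2 + 1)
         (if sc.2 = cr.2 then q.1 + 1 else q.1, sc.1, sc.2))
      ((0 : Int), List.replicate 26 false, (0 : Int))).1

-- ===== PRECONDITION & SPEC =====
-- Pre_ is exactly the strings on which A returns: every character's ord(c)-97 must fall
-- inside the 26-element lists (Python's negative indexing reaches down to -26, so
-- character codes 71 through 122); on any other character A raises IndexError.
def Pre_numSplits1 (s : String) : Prop := s.toList.all (fun c => 71 ≤ c.toNat && c.toNat ≤ 122) = true
instance (s : String) : Decidable (Pre_numSplits1 s) := by unfold Pre_numSplits1; infer_instance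
def pvWitness_numSplits1 : String := "aacabb"

def Spec_numSplits1 (s : String) (out : Int) : Prop := out = numSplits1_alt s
instance (s : String) (out : Int) : Decidable (Spec_numSplits1 s out) := by unfold Spec_numSplits1; infer_instance

-- ===== CLAIM (what is proved, stated in full; the proofs are below) =====
def Claim_equal_numSplits1 : Prop := ∀ (s : String), Dom_numSplits1 s → Pre_numSplits1 s → Spec_numSplits1 s (numSplits1 s)

-- ===== LEMMAS AND PROOFS =====

-- the bucket Python's list indexing actually reaches for ord(c)-97 (negative wraps)
def eidx (c : Char) : Nat := if c.toNat < 97 then c.toNat - 71 else c.toNat - 97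

-- number of distinct buckets of a list of characters
def dctR (l : List Char) : Nat := (l.map eidx).toFinset.card

-- the 26-bucket frequency array A maintains, as a function of the characters counted
def cntArr (l : List Char) : List Int :=
  (List.range 26).map (fun j => (l.countP (fun c => eidx c == j) : Int))

-- the 26-bucket boolean array B maintains, as a function of the characters seen
def seenArr (l : List Char) : List Bool :=
  (List.range 26).map (fun j => decide (j ∈ l.map eidx))

-- every character's index lands inside the lists (= Pre_)
def InR (l : List Char) : Prop := ∀ c ∈ l, 71 ≤ c.toNat ∧ c.toNat ≤ 122

-- the common specification both loops compute: walking `todo` with prefix `done` already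
-- seen, count positions where the prefix's distinct count equals the suffix's
def specGo : List Char → List Char → Int
  | _, [] => 0
  | done, c :: t => (if dctR (done ++ [c]) = dctR t then 1 else 0) + specGo (done ++ [c]) t

theorem eidx_lt {c : Char} (h1 : 71 ≤ c.toNat) (h2 : c.toNat ≤ 122) : eidx c < 26 := by
  unfold eidx; split <;> omega

theorem pySetD_neg {α : Type} (xs : List α) (v : α) (k : Nat) (h1 : 0 < k) (h2 : k ≤ xs.length) :
    PySem.List.pySetD xs (-(k:Int)) v = xs.set (xs.length - k) v := by
  rw [PySem.List.pySetD, PySem.List.pySet?, PySem.List.pyIdx?]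
  rw [if_neg (by omega), if_pos (by omega)]
  simp

theorem pyGetD_bridge {α : Type} (arr : List α) (d : α) (c : Char)
    (hlen : arr.length = 26) (h1 : 71 ≤ c.toNat) (h2 : c.toNat ≤ 122) :
    PySem.List.pyGetD arr ((c.toNat : Int) - 97) d = arr.getD (eidx c) d := by
  by_cases hneg : c.toNat < 97
  · have hk : ((c.toNat : Int) - 97) = -((97 - c.toNat : Nat) : Int) := by omega
    rw [hk, PySem.List.pyGetD_neg_natCast arr _ d (by omega) (by omega)]
    have he : eidx c = arr.length - (97 - c.toNat) := by unfold eidx; split <;> omega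
    rw [he, List.getD_eq_getElem arr d (by omega)]
  · have hk : ((c.toNat : Int) - 97) = ((c.toNat - 97 : Nat) : Int) := by omega
    rw [hk, PySem.List.pyGetD_natCast]
    have he : eidx c = c.toNat - 97 := by unfold eidx; split <;> omega
    rw [he]

theorem pySetD_bridge {α : Type} (arr : List α) (v : α) (c : Char)
    (hlen : arr.length = 26) (h1 : 71 ≤ c.toNat) (h2 : c.toNat ≤ 122) :
    PySem.List.pySetD arr ((c.toNat : Int) - 97) v = arr.set (eidx c) v := by
  by_cases hneg : c.toNat < 97
  · have hk : ((c.toNat : Int) - 97) = -((97 - c.toNat : Nat) : Int) := by omega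
    rw [hk, pySetD_neg arr v _ (by omega) (by omega)]
    have he : eidx c = arr.length - (97 - c.toNat) := by unfold eidx; split <;> omega
    rw [he]
  · have hk : ((c.toNat : Int) - 97) = ((c.toNat - 97 : Nat) : Int) := by omega
    rw [hk, PySem.List.pySetD_natCast]
    have he : eidx c = c.toNat - 97 := by unfold eidx; split <;> omega
    rw [he]

theorem dctR_reverse (l : List Char) : dctR l.reverse = dctR l := by
  unfold dctR
  rw [List.map_reverse, List.toFinset_reverse]

theorem sumInd (l : List Int) :
    (l.map (fun i => if i > 0 then (1:Int) else 0)).sum = (l.countP (fun i => decide (0 < i)) : Int) := by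
  induction l with
  | nil => simp
  | cons x t ih =>
    by_cases h : 0 < x <;> simp [List.countP_cons, h, ih] <;> push_cast <;> ring

theorem countP_flip (l : List Nat) (j0 : Nat) (p q : Nat → Bool)
    (hnd : l.Nodup) (hj : j0 ∈ l) (hp0 : p j0 = false) (hq1 : q j0 = true)
    (hother : ∀ j ∈ l, j ≠ j0 → p j = q j) :
    l.countP q = l.countP p + 1 := by
  induction l with
  | nil => cases hj
  | cons x t ih =>
    have hnd' := List.nodup_cons.mp hnd
    by_cases hx : x = j0
    · subst hx
      have hieq : t.countP p = t.countP q := by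
        apply List.countP_congr
        intro a ha
        rw [hother a (List.mem_cons_of_mem _ ha) (fun h => hnd'.1 (h ▸ ha))]
      simp [List.countP_cons, hp0, hq1, ← hieq]
    · have hjt : j0 ∈ t := by
        rcases List.mem_cons.mp hj with h | h
        · exact absurd h.symm hx
        · exact h
      have hpq : p x = q x := hother x List.mem_cons_self hx
      have hrec := ih hnd'.2 hjt (fun j hjm hne => hother j (List.mem_cons_of_mem _ hjm) hne)
      simp only [List.countP_cons, hrec, ← hpq]
      omega

theorem hc_eq_dctR (l : List Char) (h : InR l) :
    (List.range 26).countP (fun j => decide (0 < l.countP (fun c => eidx c == j))) = dctR l := by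
  induction l with
  | nil => simp [dctR]
  | cons c t ih =>
    have hc : 71 ≤ c.toNat ∧ c.toNat ≤ 122 := h c List.mem_cons_self
    have ht : InR t := fun a ha => h a (List.mem_cons_of_mem _ ha)
    have hjc : eidx c < 26 := eidx_lt hc.1 hc.2
    by_cases hmem : eidx c ∈ t.map eidx
    · have heq : (List.range 26).countP
            (fun j => decide (0 < (c :: t).countP (fun c' => eidx c' == j)))
          = (List.range 26).countP
            (fun j => decide (0 < t.countP (fun c' => eidx c' == j))) := by
        apply List.countP_congr
        intro j _
        by_cases hj : eidx c = j
        · obtain ⟨a, hat, haeq⟩ := List.mem_map.mp hmem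
          have hpos : 0 < t.countP (fun c' => eidx c' == j) :=
            List.countP_pos_iff.mpr ⟨a, hat, by simp [haeq, hj]⟩
          simp [List.countP_cons, hpos, Nat.lt_add_right 1 hpos]
        · simp [List.countP_cons, hj]
      rw [heq, ih ht]
      simp [dctR, List.map_cons, List.toFinset_cons,
        Finset.insert_eq_self.mpr (List.mem_toFinset.mpr hmem)]
    · have hzero : t.countP (fun c' => eidx c' == eidx c) = 0 := by
        by_contra hne
        obtain ⟨a, hat, hap⟩ := List.countP_pos_iff.mp (Nat.pos_of_ne_zero hne)
        exact hmem (List.mem_map.mpr ⟨a, hat, by simpa using hap⟩)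
      have step : (List.range 26).countP
            (fun j => decide (0 < (c :: t).countP (fun c' => eidx c' == j)))
          = (List.range 26).countP
            (fun j => decide (0 < t.countP (fun c' => eidx c' == j))) + 1 := by
        apply countP_flip _ (eidx c) _ _ List.nodup_range (List.mem_range.mpr hjc)
        · simp [hzero]
        · simp [List.countP_cons, hzero]
        · intro j _ hne
          have hj : ¬ (eidx c = j) := fun hh => hne hh.symm
          simp [List.countP_cons, hj]
      rw [step, ih ht]
      simp [dctR, List.map_cons, List.toFinset_cons,
        Finset.card_insert_of_notMem (fun hm => hmem (List.mem_toFinset.mp hm))]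

theorem helper_eq_dctR (l : List Char) (h : InR l) : pyHelper (cntArr l) = (dctR l : Int) := by
  rw [pyHelper, cntArr, sumInd, List.countP_map]
  have heq : (List.range 26).countP
        ((fun i => decide ((0:Int) < i)) ∘ fun j => ((l.countP (fun c => eidx c == j) : Nat) : Int))
      = (List.range 26).countP (fun j => decide (0 < l.countP (fun c => eidx c == j))) := by
    apply List.countP_congr
    intro j _
    simp [Function.comp_def, Int.natCast_pos]
  rw [heq, hc_eq_dctR l h]

theorem cntArr_getD (l : List Char) (k : Nat) (hk : k < 26) :
    (cntArr l).getD k 0 = (l.countP (fun c => eidx c == k) : Int) := by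
  simp [cntArr, List.getD_eq_getElem?_getD, List.getElem?_map, List.getElem?_range, hk]

theorem cntArr_len (l : List Char) : (cntArr l).length = 26 := by simp [cntArr]

theorem cnt_inc (l : List Char) (c : Char) (h1 : 71 ≤ c.toNat) (h2 : c.toNat ≤ 122) :
    pyAddAt (cntArr l) ((c.toNat : Int) - 97) 1 = cntArr (l ++ [c]) := by
  have hk : eidx c < 26 := eidx_lt h1 h2
  rw [pyAddAt, pyGetD_bridge _ _ c (cntArr_len l) h1 h2,
    pySetD_bridge _ _ c (cntArr_len l) h1 h2, cntArr_getD l _ hk]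
  apply List.ext_getElem
  · simp [cntArr]
  · intro i hi₁ hi₂
    have hi : i < 26 := by simpa [cntArr] using hi₂
    rw [List.getElem_set]
    by_cases hik : eidx c = i <;>
      simp [hik, cntArr, List.countP_append, List.countP_cons]

theorem cnt_dec (t : List Char) (c : Char) (h1 : 71 ≤ c.toNat) (h2 : c.toNat ≤ 122) :
    pyAddAt (cntArr (c :: t)) ((c.toNat : Int) - 97) (-1) = cntArr t := by
  have hk : eidx c < 26 := eidx_lt h1 h2
  rw [pyAddAt, pyGetD_bridge _ _ c (cntArr_len _) h1 h2,
    pySetD_bridge _ _ c (cntArr_len _) h1 h2, cntArr_getD _ _ hk]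
  apply List.ext_getElem
  · simp [cntArr]
  · intro i hi₁ hi₂
    have hi : i < 26 := by simpa [cntArr] using hi₂
    rw [List.getElem_set]
    by_cases hik : eidx c = i <;>
      simp [hik, cntArr, List.countP_cons]

theorem a_first (l q : List Char) (h : InR l) :
    l.foldl (fun c ch => pyAddAt c ((ch.toNat : Int) - 97) 1) (cntArr q) = cntArr (q ++ l) := by
  induction l generalizing q with
  | nil => simp
  | cons c t ih =>
    have hc := h c List.mem_cons_self
    have ht : InR t := fun a ha => h a (List.mem_cons_of_mem _ ha)
    rw [List.foldl_cons, cnt_inc q c hc.1 hc.2, ih (q ++ [c]) ht]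
    simp

theorem cntArr_nil : List.replicate 26 (0 : Int) = cntArr [] := by decide

theorem a_main (t done : List Char) (res : Int) (ht : InR t) (hd : InR done) :
    (t.foldl
       (fun (st : Int × List Int × List Int) ch =>
          let idx : Int := (ch.toNat : Int) - 97
          let c1' := pyAddAt st.2.1 idx (-1)
          let c2' := pyAddAt st.2.2 idx 1
          (if pyHelper c1' = pyHelper c2' then st.1 + 1 else st.1, c1', c2'))
       (res, cntArr t, cntArr done)).1 = res + specGo done t := by
  induction t generalizing done res with
  | nil => simp [specGo]
  | cons c t' ih =>
    have hc := ht c List.mem_cons_self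
    have ht' : InR t' := fun a ha => ht a (List.mem_cons_of_mem _ ha)
    have hd' : InR (done ++ [c]) := by
      intro a ha
      rcases List.mem_append.mp ha with h | h
      · exact hd a h
      · simp at h; exact h ▸ hc
    rw [List.foldl_cons]
    simp only [cnt_dec t' c hc.1 hc.2, cnt_inc done c hc.1 hc.2,
      helper_eq_dctR t' ht', helper_eq_dctR (done ++ [c]) hd']
    have hcond : ((dctR t' : Int) = (dctR (done ++ [c]) : Int)) ↔ (dctR (done ++ [c]) = dctR t') := by
      constructor <;> intro h <;> exact_mod_cast h.symm
    rw [if_congr hcond rfl rfl, specGo]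
    split_ifs with hsp
    · rw [ih (done ++ [c]) (res + 1) ht' hd']; ring
    · rw [ih (done ++ [c]) res ht' hd']; ring

-- ===== B-side lemmas =====

theorem seenArr_len (l : List Char) : (seenArr l).length = 26 := by simp [seenArr]

theorem seenArr_getD (l : List Char) (c : Char) (hk : eidx c < 26) :
    (seenArr l).getD (eidx c) false = decide (eidx c ∈ l.map eidx) := by
  have hlt : eidx c < ((List.range 26).map (fun j => decide (j ∈ l.map eidx))).length := by
    simpa using hk
  rw [seenArr, List.getD_eq_getElem _ _ hlt, List.getElem_map, List.getElem_range]

theorem seenArr_stay (l : List Char) (c : Char) (hm : eidx c ∈ l.map eidx) :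
    seenArr (l ++ [c]) = seenArr l := by
  unfold seenArr
  apply List.map_congr_left
  intro j _
  apply decide_eq_decide.mpr
  simp only [List.map_append, List.map_cons, List.map_nil, List.mem_append,
    List.mem_singleton]
  constructor
  · rintro (h | h)
    · exact h
    · exact h ▸ hm
  · exact Or.inl

theorem seenArr_set (l : List Char) (c : Char) (hk : eidx c < 26) :
    (seenArr l).set (eidx c) true = seenArr (l ++ [c]) := by
  apply List.ext_getElem
  · simp [seenArr]
  · intro i hi₁ hi₂
    have hi : i < 26 := by simpa [seenArr] using hi₂
    rw [List.getElem_set]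
    by_cases hik : eidx c = i
    · rw [if_pos hik]
      have hmem : i ∈ (l ++ [c]).map eidx := by
        rw [List.map_append]
        exact List.mem_append.mpr (Or.inr (by simp [hik]))
      simp only [seenArr, List.getElem_map, List.getElem_range]
      exact (decide_eq_true hmem).symm
    · rw [if_neg hik]
      have hiff : i ∈ l.map eidx ↔ i ∈ (l ++ [c]).map eidx := by
        constructor
        · intro h
          rw [List.map_append]
          exact List.mem_append.mpr (Or.inl h)
        · intro h
          rw [List.map_append] at h
          rcases List.mem_append.mp h with h | h
          · exact h
          · have : i = eidx c := by simpa using h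
            exact absurd this (fun he => hik he.symm)
      simp only [seenArr, List.getElem_map, List.getElem_range]
      exact decide_eq_decide.mpr hiff

theorem toFinset_snoc (m : List Nat) (x : Nat) :
    (m ++ [x]).toFinset = insert x m.toFinset := by
  simp [List.toFinset_append, Finset.union_comm, Finset.singleton_union]

theorem dctR_snoc_mem (l : List Char) (c : Char) (hm : eidx c ∈ l.map eidx) :
    dctR (l ++ [c]) = dctR l := by
  unfold dctR
  rw [List.map_append, List.map_singleton, toFinset_snoc,
    Finset.insert_eq_self.mpr (List.mem_toFinset.mpr hm)]

theorem dctR_snoc_new (l : List Char) (c : Char) (hm : eidx c ∉ l.map eidx) :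
    dctR (l ++ [c]) = dctR l + 1 := by
  unfold dctR
  rw [List.map_append, List.map_singleton, toFinset_snoc,
    Finset.card_insert_of_notMem (fun hmm => hm (List.mem_toFinset.mp hmm))]

-- one character's update of B's (seen, cnt) state, as maintained over the processed prefix
theorem step_state (q : List Char) (c : Char) (h1 : 71 ≤ c.toNat) (h2 : c.toNat ≤ 122) :
    (if PySem.List.pyGetD (seenArr q) ((c.toNat : Int) - 97) false
       then (seenArr q, (dctR q : Int))
       else (PySem.List.pySetD (seenArr q) ((c.toNat : Int) - 97) true, (dctR q : Int) + 1))
    = (seenArr (q ++ [c]), (dctR (q ++ [c]) : Int)) := by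
  have hk : eidx c < 26 := eidx_lt h1 h2
  rw [pyGetD_bridge _ _ c (seenArr_len q) h1 h2, pySetD_bridge _ _ c (seenArr_len q) h1 h2,
    seenArr_getD q c hk]
  by_cases hm : eidx c ∈ q.map eidx
  · rw [if_pos (by simpa using hm), seenArr_stay q c hm, dctR_snoc_mem q c hm]
  · rw [if_neg (by simpa using hm), seenArr_set q c hk, dctR_snoc_new q c hm]
    push_cast
    ring_nf

theorem b_phase1 (rs q : List Char) (a0 : List Int) (seen0 : List Bool) (cnt0 : Int)
    (hin : InR rs) (hs : seen0 = seenArr q) (hc : cnt0 = (dctR q : Int)) :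
    rs.foldl
        (fun (p : List Int × List Bool × Int) c =>
           let idx : Int := (c.toNat : Int) - 97
           let sc : List Bool × Int :=
             if PySem.List.pyGetD p.2.1 idx false then (p.2.1, p.2.2)
             else (PySem.List.pySetD p.2.1 idx true, p.2.2 + 1)
           (p.1 ++ [sc.2], sc.1, sc.2))
        (a0, seen0, cnt0)
      = (a0 ++ (List.range rs.length).map (fun j => (dctR (q ++ rs.take (j+1)) : Int)),
         seenArr (q ++ rs), (dctR (q ++ rs) : Int)) := by
  induction rs generalizing q a0 seen0 cnt0 with
  | nil => simp [hs, hc]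
  | cons c t ih =>
    have hcb := hin c List.mem_cons_self
    have ht : InR t := fun a ha => hin a (List.mem_cons_of_mem _ ha)
    subst hs hc
    rw [List.foldl_cons]
    simp only [step_state q c hcb.1 hcb.2]
    rw [ih (q ++ [c]) _ _ _ ht rfl rfl]
    refine Prod.ext ?_ (by simp only [List.append_assoc, List.singleton_append])
    show a0 ++ [(dctR (q ++ [c]) : Int)]
          ++ (List.range t.length).map (fun j => (dctR ((q ++ [c]) ++ t.take (j+1)) : Int))
        = a0 ++ (List.range (t.length + 1)).map (fun j => (dctR (q ++ (c :: t).take (j+1)) : Int))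
    rw [List.range_succ_eq_map, List.map_cons, List.map_map]
    simp only [Function.comp_def, List.take_succ_cons, List.take_zero, List.append_assoc,
      List.singleton_append]

theorem tail_map_range (g : Nat → Int) (m : Nat) (hg : g (m+1) = 0) :
    ((List.range (m+1)).map g ++ [(0:Int)]).tail = (List.range (m+1)).map (fun i => g (i+1)) := by
  conv_lhs => rw [List.range_succ_eq_map]
  rw [List.map_cons, List.cons_append, List.tail_cons]
  conv_rhs => rw [List.range_succ]
  rw [List.map_append, List.map_map, List.map_singleton, hg]
  simp [Function.comp_def]

theorem b_right_tail (cs : List Char) :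
    PySem.List.slice
        (([(0 : Int)] ++ (List.range cs.length).map
            (fun j => (dctR (cs.reverse.take (j+1)) : Int))).reverse)
        (some 1) none
      = (List.range cs.length).map (fun i => (dctR (cs.drop (i+1)) : Int)) := by
  rw [PySem.List.slice_from_one]
  have hrev : ((List.range cs.length).map
        (fun j => (dctR (cs.reverse.take (j+1)) : Int))).reverse
      = (List.range cs.length).map (fun i => (dctR (cs.drop i) : Int)) := by
    apply List.ext_getElem
    · simp
    · intro i hi₁ hi₂
      have hn : i < cs.length := by simpa using hi₂
      rw [List.getElem_reverse]
      simp only [List.length_map, List.length_range, List.getElem_map, List.getElem_range]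
      have h1 : cs.length - 1 - i + 1 = cs.length - i := by omega
      rw [h1, List.take_reverse]
      have h2 : cs.length - (cs.length - i) = i := by omega
      rw [h2, dctR_reverse]
  rw [List.reverse_append, List.reverse_singleton, hrev]
  cases cs with
  | nil => simp
  | cons c t =>
    have := tail_map_range (fun i => (dctR ((c :: t).drop i) : Int)) t.length (by simp [dctR])
    simpa using this

theorem b_main (t done : List Char) (res : Int) (seen0 : List Bool) (cnt0 : Int)
    (hin : InR t) (hs : seen0 = seenArr done) (hc : cnt0 = (dctR done : Int)) :
    ((t.zip ((List.range t.length).map (fun i => (dctR (t.drop (i+1)) : Int)))).foldl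
        (fun (q : Int × List Bool × Int) cr =>
           let idx : Int := (cr.1.toNat : Int) - 97
           let sc : List Bool × Int :=
             if PySem.List.pyGetD q.2.1 idx false then (q.2.1, q.2.2)
             else (PySem.List.pySetD q.2.1 idx true, q.2.2 + 1)
           (if sc.2 = cr.2 then q.1 + 1 else q.1, sc.1, sc.2))
        (res, seen0, cnt0)).1 = res + specGo done t := by
  induction t generalizing done res seen0 cnt0 with
  | nil => simp [specGo]
  | cons c t' ih =>
    have hcb := hin c List.mem_cons_self
    have ht' : InR t' := fun a ha => hin a (List.mem_cons_of_mem _ ha)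
    subst hs hc
    rw [List.length_cons, List.range_succ_eq_map, List.map_cons, List.map_map, List.zip_cons_cons,
      List.foldl_cons]
    simp only [step_state done c hcb.1 hcb.2, List.drop_succ_cons, List.drop_zero,
      Function.comp_def]
    rw [ih (done ++ [c]) _ _ _ ht' rfl rfl]
    have hcond : ((dctR (done ++ [c]) : Int) = (dctR t' : Int)) ↔ (dctR (done ++ [c]) = dctR t') :=
      Nat.cast_inj
    rw [if_congr hcond rfl rfl, specGo]
    split_ifs with hsp <;> ring

-- ===== assembly =====

theorem seenArr_nil : List.replicate 26 false = seenArr [] := by decide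

theorem numSplits1_spec : Claim_equal_numSplits1 := by
  unfold Claim_equal_numSplits1
  intro s _ hpre
  unfold Spec_numSplits1
  have hlc : InR s.toList := by
    intro c hc
    have := List.all_eq_true.mp hpre c hc
    simpa using this
  have hrev : InR s.toList.reverse := fun a ha => hlc a (List.mem_reverse.mp ha)
  have hnil : InR ([] : List Char) := fun a ha => absurd ha (List.not_mem_nil)
  have hA : numSplits1 s = 0 + specGo [] s.toList := by
    rw [numSplits1]
    simp only [cntArr_nil]
    rw [a_first s.toList [] hlc]
    simpa using a_main s.toList [] 0 hlc hnil
  have hB : numSplits1_alt s = 0 + specGo [] s.toList := by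
    rw [numSplits1_alt]
    rw [b_phase1 s.toList.reverse [] [(0 : Int)] _ _ hrev seenArr_nil (by simp [dctR])]
    simp only [List.nil_append, List.length_reverse]
    rw [b_right_tail s.toList]
    exact b_main s.toList [] 0 _ _ hlc seenArr_nil (by simp [dctR])
  rw [hA, hB]
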